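-- pv_equiv track=rewrite | github.com/LezuLezu/AdventOfCode | 2015/Day_05/NaughtyOrNice.py | isNice_P2
-- ===== SOURCE A (Python) =====
-- def isNice_P2(string):
--     doublePair = False
--     repeatLetter = False
--     for i in range(len(string)):
--         if i < len(string) - 3:
--             if string[i] + string[i + 1] in string[i + 2:]:
--                 doublePair = True
--         if i < len(string) - 2:
--             if string[i] == string[i + 2]:
--                 repeatLetter = True
--     if doublePair and repeatLetter:
--         return True
--     else:
--         return False
-- ===== SOURCE B (Python) =====
-- def isNice_P2(string):
--     doublePair = False
--     repeatLetter = False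
--     first = {}
--     for i in range(len(string) - 1):
--         pair = string[i:i + 2]
--         if pair in first:
--             if first[pair] <= i - 2:
--                 doublePair = True
--         else:
--             first[pair] = i
--         if i >= 1 and string[i - 1] == string[i + 1]:
--             repeatLetter = True
--     return doublePair and repeatLetter
-- ===== Notes on version B (the rewrite author's own statement) =====
-- stated objective: faster
-- what changed: replaces A's per-index substring search over the remaining tail (quadratic) with a single pass that records each pair's first index in a dict and flags a later occurrence at distance >= 2
import Mathlib
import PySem

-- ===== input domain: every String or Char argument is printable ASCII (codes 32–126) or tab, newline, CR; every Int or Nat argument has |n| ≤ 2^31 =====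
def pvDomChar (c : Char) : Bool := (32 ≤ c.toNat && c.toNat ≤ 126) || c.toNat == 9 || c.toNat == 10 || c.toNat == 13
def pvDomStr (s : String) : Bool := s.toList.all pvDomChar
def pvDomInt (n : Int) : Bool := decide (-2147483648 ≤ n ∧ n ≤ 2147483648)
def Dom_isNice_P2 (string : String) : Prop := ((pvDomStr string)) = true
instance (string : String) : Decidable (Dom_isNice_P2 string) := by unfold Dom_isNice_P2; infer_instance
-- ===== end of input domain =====

-- B replaces A's per-index substring search over the tail with a single pass that
-- records each pair's first index in a dict (objective: faster).

-- ===== PORT A =====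
def isNice_P2 (string : String) : Bool :=
  let s := string.toList
  let n : Int := (s.length : Int)
  let r := (PySem.List.pyRange 0 n 1).foldl
    (fun (st : Bool × Bool) (i : Int) =>
      let dp :=
        if i < n - 3 then
          if PySem.Chars.isIn [PySem.List.pyGetD s i ' ', PySem.List.pyGetD s (i + 1) ' ']
              (PySem.List.slice s (some (i + 2)) none) then true else st.1
        else st.1
      let rl :=
        if i < n - 2 then
          if PySem.List.pyGetD s i ' ' = PySem.List.pyGetD s (i + 2) ' ' then true else st.2
        else st.2
      (dp, rl)) (false, false)
  r.1 && r.2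

-- ===== PORT B =====
def isNice_P2_alt (string : String) : Bool :=
  let s := string.toList
  let n : Int := (s.length : Int)
  let r := (PySem.List.pyRange 0 (n - 1) 1).foldl
    (fun (st : PySem.Dict (List Char) Int × Bool × Bool) (i : Int) =>
      let pair := PySem.List.slice s (some i) (some (i + 2))
      let (first, dp, rl) := st
      let (first, dp) :=
        match first.get? pair with
        | some f => (first, if f ≤ i - 2 then true else dp)
        | none => (first.insert pair i, dp)
      let rl :=
        if 1 ≤ i ∧ PySem.List.pyGetD s (i - 1) ' ' = PySem.List.pyGetD s (i + 1) ' '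
          then true else rl
      (first, dp, rl))
    (PySem.Dict.empty, false, false)
  r.2.1 && r.2.2

-- ===== PRECONDITION & SPEC =====
def Spec_isNice_P2 (string : String) (out : Bool) : Prop := out = isNice_P2_alt string
instance (string : String) (out : Bool) : Decidable (Spec_isNice_P2 string out) := by unfold Spec_isNice_P2; infer_instance

-- ===== CLAIM (what is proved, stated in full; the proofs are below) =====
def Claim_equal_isNice_P2 : Prop := ∀ (string : String), Dom_isNice_P2 string → Spec_isNice_P2 string (isNice_P2 string)

-- ===== LEMMAS AND PROOFS =====

/-- The two-character "pair" starting at index `k` (every use keeps both reads in range). -/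
def prCh (l : List Char) (k : Nat) : List Char := [l.getD k ' ', l.getD (k + 1) ' ']

/-- Some pair occurs at two positions at distance ≥ 2 (Python's `doublePair`). -/
def PDP (l : List Char) : Prop :=
  ∃ a b : Nat, a + 2 ≤ b ∧ b + 1 < l.length ∧ prCh l a = prCh l b

/-- Some letter repeats with exactly one letter between (Python's `repeatLetter`). -/
def PRL (l : List Char) : Prop :=
  ∃ k : Nat, k + 2 < l.length ∧ l.getD k ' ' = l.getD (k + 2) ' '

lemma find?_range_some {p : Nat → Bool} {m f : Nat}
    (h : (List.range m).find? p = some f) : f < m ∧ p f = true ∧ ∀ g < f, p g = false := by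
  rw [List.find?_eq_some_iff_getElem] at h
  obtain ⟨hp, i, hi, hval, hmin⟩ := h
  simp [List.getElem_range] at hval hmin
  subst hval
  refine ⟨by simpa using hi, hp, fun g hg => ?_⟩
  simpa using hmin g hg

lemma pair_prefix (a b : Char) (t : List Char) :
    ([a, b] <+: t) ↔ t[0]? = some a ∧ t[1]? = some b := by
  match t with
  | [] => simp
  | [x] => simp [List.cons_prefix_cons]
  | x :: y :: r => simp [List.cons_prefix_cons, eq_comm]

lemma or_fold (L : List Int) (f g : Int → Bool) (a b : Bool) :
    L.foldl (fun st i => (st.1 || f i, st.2 || g i)) (a, b) = (a || L.any f, b || L.any g) := by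
  induction L generalizing a b with
  | nil => simp
  | cons x L ih => simp [List.foldl_cons, ih, Bool.or_assoc]

lemma take2_drop (l : List Char) (m : Nat) (h : m + 1 < l.length) :
    (l.drop m).take 2 = [l.getD m ' ', l.getD (m + 1) ' '] := by
  have h0 : l.drop m = l[m] :: l.drop (m + 1) := List.drop_eq_getElem_cons (by omega)
  have h1 : l.drop (m + 1) = l[m + 1] :: l.drop (m + 2) := List.drop_eq_getElem_cons (by omega)
  rw [h0, h1, List.take_succ_cons, List.take_succ_cons, List.take_zero]
  simp [List.getD_eq_getElem?_getD, h, Nat.lt_of_succ_lt h]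

lemma pair_slice (l : List Char) (m : Nat) (h : m + 1 < l.length) :
    PySem.List.slice l (some (m : Int)) (some ((m : Int) + 2)) = prCh l m := by
  rw [PySem.List.slice_toNat l (by omega) (by omega)]
  have h1 : ((m : Int)).toNat = m := by omega
  have h2 : ((m : Int) + 2).toNat = m + 2 := by omega
  rw [h1, h2, show m + 2 - m = 2 from by omega, take2_drop l m h, prCh]

/-- A's loop result, characterised: the two flags decide `PDP` and `PRL`. -/
lemma A_iff (s : String) : isNice_P2 s = true ↔ PDP s.toList ∧ PRL s.toList := by
  unfold isNice_P2
  dsimp only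
  set l := s.toList with hl
  set n : Int := (l.length : Int) with hn
  have hstep : (fun (st : Bool × Bool) (i : Int) =>
        let dp :=
          if i < n - 3 then
            if PySem.Chars.isIn [PySem.List.pyGetD l i ' ', PySem.List.pyGetD l (i + 1) ' ']
                (PySem.List.slice l (some (i + 2)) none) then true else st.1
          else st.1
        let rl :=
          if i < n - 2 then
            if PySem.List.pyGetD l i ' ' = PySem.List.pyGetD l (i + 2) ' ' then true else st.2
          else st.2
        (dp, rl))
      = (fun (st : Bool × Bool) (i : Int) =>
          (st.1 || (if i < n - 3 then
              PySem.Chars.isIn [PySem.List.pyGetD l i ' ', PySem.List.pyGetD l (i + 1) ' ']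
                (PySem.List.slice l (some (i + 2)) none) else false),
           st.2 || (if i < n - 2 then
              decide (PySem.List.pyGetD l i ' ' = PySem.List.pyGetD l (i + 2) ' ') else false))) := by
    funext st i
    dsimp only
    congr 1 <;> split_ifs <;> simp_all
  rw [hstep, or_fold]
  simp only [Bool.false_or, Bool.and_eq_true]
  apply and_congr
  · -- doublePair part
    rw [PySem.List.pyRange_one, List.any_map]
    simp only [List.any_eq_true, List.mem_range, Function.comp, zero_add]
    constructor
    · rintro ⟨k, hk, hcond⟩
      by_cases hg : (k : Int) < n - 3
      · rw [if_pos hg] at hcond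
        rw [PySem.List.slice_from l (by omega : (0:Int) ≤ (k:Int) + 2)] at hcond
        have h2 : ((k : Int) + 2).toNat = k + 2 := by omega
        rw [h2, ← PySem.Chars.exists_prefix_drop_iff_isIn] at hcond
        obtain ⟨j, hj⟩ := hcond
        rw [List.drop_drop, pair_prefix] at hj
        obtain ⟨h0, h1⟩ := hj
        rw [List.getElem?_drop, Nat.add_zero] at h0
        rw [List.getElem?_drop] at h1
        have hb1 : k + 2 + j + 1 < l.length := by
          have := List.getElem?_eq_some_iff.mp h1 |>.choose
          omega
        have e0 : l.getD (k + 2 + j) ' ' = l.getD k ' ' := by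
          rw [List.getD_eq_getElem?_getD, h0, Option.getD_some, PySem.List.pyGetD_natCast]
        have e1 : l.getD (k + 2 + j + 1) ' ' = l.getD (k + 1) ' ' := by
          rw [List.getD_eq_getElem?_getD, h1, Option.getD_some,
            show ((k:Int) + 1) = ((k + 1 : Nat) : Int) from by push_cast; ring,
            PySem.List.pyGetD_natCast]
        refine ⟨k, k + 2 + j, by omega, by omega, ?_⟩
        simp only [prCh, e0, e1]
      · rw [if_neg hg] at hcond; exact absurd hcond (by simp)
    · rintro ⟨a, b, hab, hb, hpr⟩
      have hlen : a + 3 < l.length := by omega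
      refine ⟨a, by omega, ?_⟩
      rw [if_pos (by omega : (a : Int) < n - 3)]
      rw [PySem.List.slice_from l (by omega : (0:Int) ≤ (a:Int) + 2)]
      have h2 : ((a : Int) + 2).toNat = a + 2 := by omega
      rw [h2, ← PySem.Chars.exists_prefix_drop_iff_isIn]
      refine ⟨b - (a + 2), ?_⟩
      rw [List.drop_drop, show a + 2 + (b - (a + 2)) = b from by omega, pair_prefix]
      simp only [prCh, List.cons.injEq, and_true] at hpr
      obtain ⟨e0, e1⟩ := hpr
      have g0 : l[b]? = some (l.getD b ' ') := by
        rw [List.getD_eq_getElem?_getD, List.getElem?_eq_getElem (by omega)]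
        simp
      have g1 : l[b + 1]? = some (l.getD (b + 1) ' ') := by
        rw [List.getD_eq_getElem?_getD, List.getElem?_eq_getElem (by omega)]
        simp
      constructor
      · rw [List.getElem?_drop, Nat.add_zero, g0, ← e0, PySem.List.pyGetD_natCast]
      · rw [List.getElem?_drop, g1, ← e1,
          show ((a:Int) + 1) = ((a + 1 : Nat) : Int) from by push_cast; ring,
          PySem.List.pyGetD_natCast]
  · -- repeatLetter part
    rw [PySem.List.pyRange_one, List.any_map]
    simp only [List.any_eq_true, List.mem_range, Function.comp, zero_add]
    constructor
    · rintro ⟨k, hk, hcond⟩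
      by_cases hg : (k : Int) < n - 2
      · rw [if_pos hg] at hcond
        rw [PySem.List.pyGetD_natCast,
          show ((k:Int) + 2) = ((k + 2 : Nat) : Int) from by push_cast; ring,
          PySem.List.pyGetD_natCast] at hcond
        exact ⟨k, by omega, of_decide_eq_true hcond⟩
      · rw [if_neg hg] at hcond; exact absurd hcond (by simp)
    · rintro ⟨k, hk2, heq⟩
      refine ⟨k, by omega, ?_⟩
      rw [if_pos (by omega : (k : Int) < n - 2)]
      rw [PySem.List.pyGetD_natCast,
        show ((k:Int) + 2) = ((k + 2 : Nat) : Int) from by push_cast; ring,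
        PySem.List.pyGetD_natCast]
      exact decide_eq_true heq

/-- Invariant of B's single pass over pair positions `0 … m-1`: the dict maps each pair
to its first occurrence, `dp` says "a repeat at distance ≥ 2 was seen", `rl` says
"a letter repeated around a middle letter was seen". -/
lemma B_inv (l : List Char) : ∀ (m : Nat), (∀ i, i < m → i + 1 < l.length) →
    ∃ (d : PySem.Dict (List Char) Int) (dp rl : Bool),
      ((List.range m).map (fun (k : Nat) => (k : Int))).foldl
        (fun (st : PySem.Dict (List Char) Int × Bool × Bool) (i : Int) =>
          let pair := PySem.List.slice l (some i) (some (i + 2))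
          let (first, dp, rl) := st
          let (first, dp) :=
            match first.get? pair with
            | some f => (first, if f ≤ i - 2 then true else dp)
            | none => (first.insert pair i, dp)
          let rl :=
            if 1 ≤ i ∧ PySem.List.pyGetD l (i - 1) ' ' = PySem.List.pyGetD l (i + 1) ' '
              then true else rl
          (first, dp, rl))
        (PySem.Dict.empty, false, false)
      = (d, dp, rl)
      ∧ (dp = true ↔ ∃ a b : Nat, a + 2 ≤ b ∧ b < m ∧ prCh l a = prCh l b)
      ∧ (rl = true ↔ ∃ k : Nat, 1 ≤ k ∧ k < m ∧ l.getD (k - 1) ' ' = l.getD (k + 1) ' ')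
      ∧ ∀ p, d.get? p = ((List.range m).find? (fun k => prCh l k == p)).map (fun (k : Nat) => (k : Int)) := by
  intro m
  induction m with
  | zero =>
    intro _
    refine ⟨PySem.Dict.empty, false, false, by simp, ?_, ?_, ?_⟩
    · simp only [Bool.false_eq_true, false_iff]; rintro ⟨a, b, _, h, _⟩; omega
    · simp only [Bool.false_eq_true, false_iff]; rintro ⟨k, _, h, _⟩; omega
    · intro p; simp [PySem.Dict.get?_empty]
  | succ m ih =>
    intro hm
    obtain ⟨d, dp, rl, hfold, hdp, hrl0, hget⟩ := ih (fun i hi => hm i (by omega))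
    have hmlen : m + 1 < l.length := hm m (by omega)
    rw [List.range_succ, List.map_append, List.foldl_append, hfold]
    simp only [List.map_cons, List.map_nil, List.foldl_cons, List.foldl_nil]
    rw [pair_slice l m hmlen]
    -- the repeat-letter component, shared by both dict cases
    have hrl : ((if 1 ≤ (m : Int) ∧
          PySem.List.pyGetD l ((m : Int) - 1) ' ' = PySem.List.pyGetD l ((m : Int) + 1) ' '
          then true else rl) = true)
        ↔ ∃ k : Nat, 1 ≤ k ∧ k < m + 1 ∧ l.getD (k - 1) ' ' = l.getD (k + 1) ' ' := by
      by_cases hm0 : m = 0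
      · subst hm0
        rw [if_neg (by rintro ⟨h, -⟩; omega)]
        rw [hrl0]
        constructor
        · rintro ⟨k, h1, h2, h3⟩; omega
        · rintro ⟨k, h1, h2, h3⟩; omega
      · have c1 : ((m : Int) - 1) = ((m - 1 : Nat) : Int) := by omega
        have c2 : ((m : Int) + 1) = ((m + 1 : Nat) : Int) := by omega
        rw [c1, c2, PySem.List.pyGetD_natCast, PySem.List.pyGetD_natCast]
        by_cases hcnd : l.getD (m - 1) ' ' = l.getD (m + 1) ' '
        · rw [if_pos ⟨by omega, hcnd⟩]
          simp only [true_iff]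
          exact ⟨m, by omega, by omega, hcnd⟩
        · rw [if_neg (by rintro ⟨-, h⟩; exact hcnd h), hrl0]
          constructor
          · rintro ⟨k, h1, h2, h3⟩; exact ⟨k, h1, by omega, h3⟩
          · rintro ⟨k, h1, h2, h3⟩
            rcases Nat.lt_succ_iff_lt_or_eq.mp h2 with h | h
            · exact ⟨k, h1, h, h3⟩
            · subst h; exact absurd h3 hcnd
    cases hc : d.get? (prCh l m) with
    | some f =>
      -- pair seen before: f is (the cast of) its first occurrence
      have hgm := hget (prCh l m)
      rw [hc] at hgm
      cases hfind : (List.range m).find? (fun k => prCh l k == prCh l m) with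
      | none => rw [hfind] at hgm; simp at hgm
      | some f' =>
        rw [hfind] at hgm
        simp only [Option.map_some, Option.some.injEq] at hgm
        subst hgm
        obtain ⟨hflt, hfeq, hfmin⟩ := find?_range_some hfind
        have hfpr : prCh l f' = prCh l m := by simpa using hfeq
        dsimp only
        refine ⟨d, _, _, rfl, ?_, hrl, ?_⟩
        · by_cases hf2 : f' + 2 ≤ m
          · rw [if_pos (by omega : ((f' : Nat) : Int) ≤ (m : Int) - 2)]
            simp only [true_iff]
            exact ⟨f', m, hf2, by omega, hfpr⟩
          · rw [if_neg (by omega : ¬ ((f' : Nat) : Int) ≤ (m : Int) - 2), hdp]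
            constructor
            · rintro ⟨a, b, h1, h2, h3⟩; exact ⟨a, b, h1, by omega, h3⟩
            · rintro ⟨a, b, h1, h2, h3⟩
              rcases Nat.lt_succ_iff_lt_or_eq.mp h2 with h | h
              · exact ⟨a, b, h1, h, h3⟩
              · exfalso
                subst h
                have hfa : f' ≤ a := by
                  by_contra hlt
                  have := hfmin a (by omega)
                  simp [h3] at this
                omega
        · intro p
          rw [List.find?_append]
          cases hfp : (List.range m).find? (fun k => prCh l k == p) with
          | some g => simp only [Option.some_or]; rw [← hfp]; exact hget p
          | none =>
            have hpne : prCh l m ≠ p := by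
              intro h
              subst h
              rw [hfp] at hfind
              simp at hfind
            have hgp := hget p
            rw [hfp] at hgp
            simp only [Option.map_none] at hgp
            rw [hgp]
            simp [hpne]
    | none =>
      -- new pair: it is inserted with index m
      have hfind : (List.range m).find? (fun k => prCh l k == prCh l m) = none := by
        have hgm := hget (prCh l m)
        rw [hc] at hgm
        cases hf : (List.range m).find? (fun k => prCh l k == prCh l m) with
        | none => rfl
        | some g => rw [hf] at hgm; simp at hgm
      have hnone : ∀ g < m, prCh l g ≠ prCh l m := by
        intro g hg
        have := List.find?_eq_none.mp hfind g (by simpa using hg)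
        simpa using this
      dsimp only
      refine ⟨d.insert (prCh l m) (m : Int), _, _, rfl, ?_, hrl, ?_⟩
      · rw [hdp]
        constructor
        · rintro ⟨a, b, h1, h2, h3⟩; exact ⟨a, b, h1, by omega, h3⟩
        · rintro ⟨a, b, h1, h2, h3⟩
          rcases Nat.lt_succ_iff_lt_or_eq.mp h2 with h | h
          · exact ⟨a, b, h1, h, h3⟩
          · subst h; exact absurd h3 (hnone a (by omega))
      · intro p
        rw [List.find?_append]
        by_cases hp : p = prCh l m
        · subst hp
          rw [PySem.Dict.get?_insert_self d _ _, hfind]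
          simp
        · rw [PySem.Dict.get?_insert_of_ne d _ hp, hget p]
          have hne : (prCh l m == p) = false := by simpa using (Ne.symm hp)
          simp [hne]

/-- B's result, characterised: the same two properties. -/
lemma B_iff (s : String) : isNice_P2_alt s = true ↔ PDP s.toList ∧ PRL s.toList := by
  unfold isNice_P2_alt
  dsimp only
  set l := s.toList with hl
  set n : Int := (l.length : Int) with hn
  rw [PySem.List.pyRange_one]
  simp only [zero_add, sub_zero]
  obtain ⟨d, dp, rl, hfold, hdp, hrl, -⟩ :=
    B_inv l ((n - 1).toNat) (fun i hi => by omega)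
  rw [hfold]
  dsimp only
  rw [Bool.and_eq_true]
  apply and_congr
  · rw [hdp]
    constructor
    · rintro ⟨a, b, h1, h2, h3⟩; exact ⟨a, b, h1, by omega, h3⟩
    · rintro ⟨a, b, h1, h2, h3⟩; exact ⟨a, b, h1, by omega, h3⟩
  · rw [hrl]
    constructor
    · rintro ⟨k, h1, h2, h3⟩
      refine ⟨k - 1, by omega, ?_⟩
      rw [show k - 1 + 2 = k + 1 from by omega]
      exact h3
    · rintro ⟨k, h2, h3⟩
      refine ⟨k + 1, by omega, by omega, ?_⟩
      rw [show k + 1 - 1 = k from by omega, show k + 1 + 1 = k + 2 from by omega]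
      exact h3

-- ===== VERDICT (by name: the statement is the Claim_ definition above) =====
theorem isNice_P2_spec : Claim_equal_isNice_P2 := by
  intro s _
  unfold Spec_isNice_P2
  rw [Bool.eq_iff_iff]
  exact (A_iff s).trans (B_iff s).symm
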